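-- pv_equiv track=rewrite | github.com/RAJUS248/Data-Structure-and-Algorithms | Spacil_Codes/02_Print All Factors of a Given Number.py | print_factor_v3
-- ===== SOURCE A (Python) =====
-- from math import sqrt
--
-- def print_factor_v3(num):
--
--     res = []
--
--     for i in range(1,int(sqrt(num))+1):
--
--         if num % i == 0:
--             res.append(i)
--
--             if num//i != i:
--                 res.append(num//i)
--
--     res.sort()
--     return res
-- ===== SOURCE B (Python) =====
-- def print_factor_v3(num):
--     # Factorize num into prime powers, then generate every divisor as a
--     # product of one power of each prime; sort the generated list.
--     if num <= 0:
--         # nothing to factorize for non-positive numbers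
--         return []
--     divisors = [1]
--     n = num
--     p = 2
--     while p * p <= n:
--         if n % p == 0:
--             pk = 1
--             powers = [1]
--             while n % p == 0:
--                 n //= p
--                 pk *= p
--                 powers.append(pk)
--             divisors = [d * q for q in powers for d in divisors]
--         p += 1
--     if n > 1:
--         divisors = divisors + [d * n for d in divisors]
--     divisors.sort()
--     return divisors
-- ===== Notes on version B (the rewrite author's own statement) =====
-- stated objective: alternative
-- what changed: B factorizes num into prime powers and generates every divisor as a product of one power per prime, instead of A's sqrt-bounded trial-division pairing of divisor/cofactor; only the final sort is shared.
import Mathlib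
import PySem

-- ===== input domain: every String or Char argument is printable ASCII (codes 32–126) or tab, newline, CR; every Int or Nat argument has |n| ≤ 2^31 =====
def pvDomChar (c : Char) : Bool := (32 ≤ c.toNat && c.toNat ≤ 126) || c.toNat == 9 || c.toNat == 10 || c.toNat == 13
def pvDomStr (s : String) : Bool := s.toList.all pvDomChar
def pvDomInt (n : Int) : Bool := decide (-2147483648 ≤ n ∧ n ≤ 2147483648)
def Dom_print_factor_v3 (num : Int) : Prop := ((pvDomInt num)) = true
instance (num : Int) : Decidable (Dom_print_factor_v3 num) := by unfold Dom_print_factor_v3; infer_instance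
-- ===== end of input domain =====

-- B factorizes num into prime powers and generates every divisor as a product of one power per
-- prime (then sorts), instead of A's sqrt-bounded trial-division pairing of divisor and cofactor.


-- ===== PORT A =====
-- int(sqrt(num)) is ported as Int.sqrt num: exact on the admitted domain 0 ≤ num ≤ 2^31,
-- where the float sqrt truncated to int coincides with the integer square root.
def print_factor_v3 (num : Int) : List Int :=
  let res := (PySem.List.pyRange 1 (Int.sqrt num + 1) 1).foldl
    (fun res i =>
      if PySem.Int.mod num i == 0 then
        let res := res ++ [i]
        if PySem.Int.floordiv num i != i then res ++ [PySem.Int.floordiv num i] else res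
      else res) []
  PySem.List.sorted res (fun x => x) false

-- ===== PORT B =====
-- Inner `while n % p == 0:` loop of B: divides p out of n, extending pk and powers.
-- `fuel` is a totality guard only; callers pass enough fuel for every state the Python loop
-- reaches from B's entry (there n ≥ 1 and p ≥ 2, and n strictly decreases at every step).
def pvDivOut : Nat → Int → Int → Int → List Int → Int × Int × List Int
  | 0, n, _, pk, powers => (n, pk, powers)
  | fuel + 1, n, p, pk, powers =>
    if (PySem.Int.mod n p == 0) = true then
      pvDivOut fuel (PySem.Int.floordiv n p) p (pk * p) (powers ++ [pk * p])
    else (n, pk, powers)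

-- Outer `while p * p <= n:` loop of B; returns the final (n, divisors).
-- `fuel` is a totality guard only (p grows by 1 per iteration, n never grows).
def pvFactLoop : Nat → Int → Int → List Int → Int × List Int
  | 0, n, _, divs => (n, divs)
  | fuel + 1, n, p, divs =>
    if p * p ≤ n then
      if (PySem.Int.mod n p == 0) = true then
        pvFactLoop fuel (pvDivOut n.toNat n p 1 [1]).1 (p + 1)
          ((pvDivOut n.toNat n p 1 [1]).2.2.flatMap (fun q => divs.map (fun d => d * q)))
      else pvFactLoop fuel n (p + 1) divs
    else (n, divs)

def print_factor_v3_alt (num : Int) : List Int :=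
  if num ≤ 0 then []
  else
    let r := pvFactLoop num.toNat num 2 [1]
    let divisors := if 1 < r.1 then r.2 ++ r.2.map (fun d => d * r.1) else r.2
    PySem.List.sorted divisors (fun x => x) false

-- ===== PRECONDITION & SPEC =====
-- Pre_ excludes num < 0, where A raises ValueError (math.sqrt of a negative number).
def Pre_print_factor_v3 (num : Int) : Prop := 0 ≤ num
instance (num : Int) : Decidable (Pre_print_factor_v3 num) := by unfold Pre_print_factor_v3; infer_instance
def pvWitness_print_factor_v3 : Int := (36)

def Spec_print_factor_v3 (num : Int) (out : List Int) : Prop := out = print_factor_v3_alt num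
instance (num : Int) (out : List Int) : Decidable (Spec_print_factor_v3 num out) := by unfold Spec_print_factor_v3; infer_instance

-- ===== CLAIM (what is proved, stated in full; the proofs are below) =====
def Claim_equal_print_factor_v3 : Prop := ∀ (num : Int), Dom_print_factor_v3 num → Pre_print_factor_v3 num → Spec_print_factor_v3 num (print_factor_v3 num)

-- ===== LEMMAS AND PROOFS =====

-- the canonical strictly increasing list of positive divisors of num
def pvC (num : Int) : List Int :=
  (PySem.List.pyRange 1 (num + 1) 1).filter (fun d => PySem.Int.mod num d == 0)

theorem pvC_pairwise (num : Int) : (pvC num).Pairwise (· < ·) :=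
  (PySem.List.pairwise_lt_pyRange_one 1 (num + 1)).filter _

theorem pvC_mem (num : Int) (h : 1 ≤ num) (x : Int) : x ∈ pvC num ↔ 1 ≤ x ∧ x ∣ num := by
  unfold pvC
  rw [List.mem_filter, PySem.List.mem_pyRange_one]
  constructor
  · rintro ⟨⟨h1, _⟩, h3⟩
    rw [beq_iff_eq, PySem.Int.mod_eq_zero_iff_dvd] at h3
    exact ⟨h1, h3⟩
  · rintro ⟨h1, h2⟩
    have h3 : x ≤ num := Int.le_of_dvd (by omega) h2
    exact ⟨⟨h1, by omega⟩, by simp [PySem.Int.mod_eq_zero_iff_dvd, h2]⟩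

-- ---------- A-side ----------

-- Per-index contribution of A's loop body, and its split into divisor and cofactor parts.
def pvF (m i : Int) : List Int :=
  if PySem.Int.mod m i == 0 then
    i :: (if PySem.Int.floordiv m i != i then [PySem.Int.floordiv m i] else [])
  else []
def pvG (m i : Int) : List Int := if PySem.Int.mod m i == 0 then [i] else []
def pvH (m i : Int) : List Int :=
  if PySem.Int.mod m i == 0 && PySem.Int.floordiv m i != i then [PySem.Int.floordiv m i] else []

theorem pvF_eq (m i : Int) : pvF m i = pvG m i ++ pvH m i := by
  simp only [pvF, pvG, pvH]
  by_cases h1 : (PySem.Int.mod m i == 0) = true <;> by_cases h2 : (PySem.Int.floordiv m i != i) = true <;>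
    simp [h1, h2]

theorem pv_foldA (m : Int) (L : List Int) : ∀ acc : List Int,
    L.foldl (fun res i =>
      if PySem.Int.mod m i == 0 then
        let res := res ++ [i]
        if PySem.Int.floordiv m i != i then res ++ [PySem.Int.floordiv m i] else res
      else res) acc = acc ++ L.flatMap (pvF m) := by
  induction L with
  | nil => simp
  | cons a L ih =>
    intro acc
    rw [List.foldl_cons, ih]
    simp only [pvF, List.flatMap_cons]
    by_cases h1 : (PySem.Int.mod m a == 0) = true <;> by_cases h2 : (PySem.Int.floordiv m a != a) = true <;>
      simp [h1, h2]

theorem pv_flatMap_perm (m : Int) (L : List Int) :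
    (L.flatMap (pvG m) ++ L.flatMap (pvH m)).Perm (L.flatMap (pvF m)) := by
  induction L with
  | nil => simp
  | cons a L ih =>
    simp only [List.flatMap_cons]
    have h1 : ((pvG m a ++ L.flatMap (pvG m)) ++ (pvH m a ++ L.flatMap (pvH m))).Perm
        ((pvG m a ++ pvH m a) ++ (L.flatMap (pvG m) ++ L.flatMap (pvH m))) := by
      refine List.perm_iff_count.mpr fun x => ?_
      simp [List.count_append]
      omega
    refine h1.trans ?_
    rw [← pvF_eq]
    exact ih.append_left _

theorem pvG_filter (m : Int) (L : List Int) :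
    L.flatMap (pvG m) = L.filter (fun i => PySem.Int.mod m i == 0) := by
  induction L with
  | nil => rfl
  | cons a L ih =>
    by_cases h : (PySem.Int.mod m a == 0) = true <;> simp [pvG, h, ih]

theorem pvH_map (m : Int) (L : List Int) :
    L.flatMap (pvH m) =
      (L.filter (fun i => PySem.Int.mod m i == 0 && PySem.Int.floordiv m i != i)).map
        (fun i => PySem.Int.floordiv m i) := by
  induction L with
  | nil => rfl
  | cons a L ih =>
    by_cases h : (PySem.Int.mod m a == 0 && PySem.Int.floordiv m a != a) = true <;>
      simp [pvH, h, ih]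

theorem pv_sq_le (m : Int) (hm : 0 ≤ m) : Int.sqrt m * Int.sqrt m ≤ m := by
  unfold Int.sqrt
  have h : m.toNat.sqrt * m.toNat.sqrt ≤ m.toNat := Nat.sqrt_le m.toNat
  have h2 : ((m.toNat.sqrt * m.toNat.sqrt : Nat) : Int) ≤ (m.toNat : Int) := by exact_mod_cast h
  push_cast at h2
  omega

theorem pv_lt_succ_sq (m : Int) (hm : 0 ≤ m) : m < (Int.sqrt m + 1) * (Int.sqrt m + 1) := by
  unfold Int.sqrt
  have h : m.toNat < (m.toNat.sqrt + 1) * (m.toNat.sqrt + 1) := Nat.lt_succ_sqrt m.toNat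
  have h2 : (m.toNat : Int) < (((m.toNat.sqrt + 1) * (m.toNat.sqrt + 1) : Nat) : Int) := by exact_mod_cast h
  push_cast at h2
  omega

theorem pv_div_mul (m i : Int) (hi : 0 < i) (h : (PySem.Int.mod m i == 0) = true) :
    i * PySem.Int.floordiv m i = m := by
  rw [PySem.Int.floordiv_eq_ediv_of_pos hi]
  rw [PySem.Int.mod_eq_emod_of_pos hi, beq_iff_eq] at h
  exact Int.mul_ediv_cancel' (Int.dvd_of_emod_eq_zero h)

theorem pv_d_pos (m i d : Int) (h1 : 1 ≤ i) (hmul : i * d = m) (hm1 : 1 ≤ m) : 1 ≤ d := by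
  nlinarith

-- cofactor of a divisor i ≤ sqrt, distinct from i, lies strictly above sqrt
theorem pv_large_gt (m i : Int) (hm : 0 ≤ m) (h1 : 1 ≤ i) (h2 : i ≤ Int.sqrt m)
    (hmod : (PySem.Int.mod m i == 0) = true) (hne : PySem.Int.floordiv m i ≠ i) :
    Int.sqrt m < PySem.Int.floordiv m i := by
  set s := Int.sqrt m with hs
  set d := PySem.Int.floordiv m i with hd
  have hmul : i * d = m := pv_div_mul m i (by omega) hmod
  have hs2 : s * s ≤ m := pv_sq_le m hm
  have hm1 : 1 ≤ m := by nlinarith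
  have hd1 : 1 ≤ d := pv_d_pos m i d h1 hmul hm1
  by_contra hle
  push Not at hle
  have h3 : i * d ≤ s * d := by nlinarith
  have h4 : s * d ≤ s * s := by nlinarith
  have h6 : s * d = s * s := by omega
  have hds : d = s := mul_left_cancel₀ (by nlinarith) h6
  have h7 : i * d = s * d := by omega
  have his : i = s := mul_right_cancel₀ (by omega) h7
  exact hne (by omega)

-- cofactors of increasing divisors strictly decrease
theorem pv_large_desc (m i j : Int) (hm : 0 ≤ m) (h1 : 1 ≤ i) (hij : i < j) (h2 : j ≤ Int.sqrt m)
    (hi : (PySem.Int.mod m i == 0) = true) (hj : (PySem.Int.mod m j == 0) = true) :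
    PySem.Int.floordiv m j < PySem.Int.floordiv m i := by
  have hmi : i * PySem.Int.floordiv m i = m := pv_div_mul m i (by omega) hi
  have hmj : j * PySem.Int.floordiv m j = m := pv_div_mul m j (by omega) hj
  have hs2 : Int.sqrt m * Int.sqrt m ≤ m := pv_sq_le m hm
  have hm1 : 1 ≤ m := by nlinarith
  have hdi : 1 ≤ PySem.Int.floordiv m i := pv_d_pos m i _ h1 hmi hm1
  have hdj : 1 ≤ PySem.Int.floordiv m j := pv_d_pos m j _ (by omega) hmj hm1
  by_contra hle
  push Not at hle
  nlinarith

-- A's accumulated list: membership = positive divisors, and no duplicates, for num ≥ 1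
theorem pvA_mem (num : Int) (h : 1 ≤ num) (x : Int) :
    x ∈ ((PySem.List.pyRange 1 (Int.sqrt num + 1) 1).flatMap (pvF num)) ↔ 1 ≤ x ∧ x ∣ num := by
  set L := PySem.List.pyRange 1 (Int.sqrt num + 1) 1 with hL
  rw [← (pv_flatMap_perm num L).mem_iff, List.mem_append, pvG_filter, pvH_map]
  have hmemL : ∀ y : Int, y ∈ L ↔ 1 ≤ y ∧ y ≤ Int.sqrt num := by
    intro y
    rw [hL, PySem.List.mem_pyRange_one]
    omega
  constructor
  · rintro (hx | hx)
    · rw [List.mem_filter] at hx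
      obtain ⟨hx1, hx2⟩ := hx
      rw [beq_iff_eq, PySem.Int.mod_eq_zero_iff_dvd] at hx2
      exact ⟨((hmemL x).mp hx1).1, hx2⟩
    · rw [List.mem_map] at hx
      obtain ⟨i, hi, rfl⟩ := hx
      rw [List.mem_filter, Bool.and_eq_true] at hi
      have h1i : 1 ≤ i := ((hmemL i).mp hi.1).1
      have hmul := pv_div_mul num i (by omega) hi.2.1
      exact ⟨pv_d_pos num i _ h1i hmul h, Dvd.intro_left i hmul⟩
  · rintro ⟨hx1, hx2⟩
    rcases le_or_gt x (Int.sqrt num) with hle | hgt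
    · left
      rw [List.mem_filter]
      exact ⟨(hmemL x).mpr ⟨hx1, hle⟩, by simp [PySem.Int.mod_eq_zero_iff_dvd, hx2]⟩
    · right
      rw [List.mem_map]
      obtain ⟨i, hi⟩ := hx2
      have hs0 : 0 ≤ Int.sqrt num := Int.sqrt_nonneg num
      have hi1 : 1 ≤ i := by nlinarith
      have his : i ≤ Int.sqrt num := by
        by_contra hc
        push Not at hc
        have := pv_lt_succ_sq num (by omega)
        nlinarith
      have himod : (PySem.Int.mod num i == 0) = true := by
        simp [PySem.Int.mod_eq_zero_iff_dvd]
        exact Dvd.intro_left x hi.symm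
      have hfd : PySem.Int.floordiv num i = x := by
        have := pv_div_mul num i (by omega) himod
        nlinarith
      refine ⟨i, ?_, hfd⟩
      rw [List.mem_filter, Bool.and_eq_true]
      refine ⟨(hmemL i).mpr ⟨hi1, his⟩, himod, ?_⟩
      rw [bne_iff_ne, hfd]
      omega

theorem pvA_nodup (num : Int) (h : 1 ≤ num) :
    ((PySem.List.pyRange 1 (Int.sqrt num + 1) 1).flatMap (pvF num)).Nodup := by
  set L := PySem.List.pyRange 1 (Int.sqrt num + 1) 1 with hL
  rw [← (pv_flatMap_perm num L).nodup_iff, pvG_filter, pvH_map]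
  have hmemL : ∀ y : Int, y ∈ L ↔ 1 ≤ y ∧ y ≤ Int.sqrt num := by
    intro y
    rw [hL, PySem.List.mem_pyRange_one]
    omega
  have hpwL : L.Pairwise (· < ·) := PySem.List.pairwise_lt_pyRange_one 1 (Int.sqrt num + 1)
  rw [List.nodup_append]
  refine ⟨(hpwL.filter _).nodup, ?_, ?_⟩
  · have hpwF : (L.filter (fun i => PySem.Int.mod num i == 0 && PySem.Int.floordiv num i != i)).Pairwise
        (fun a b => PySem.Int.floordiv num b < PySem.Int.floordiv num a) := by
      refine (hpwL.filter _).imp_of_mem ?_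
      intro a b ha hb hab
      rw [List.mem_filter, Bool.and_eq_true] at ha hb
      exact pv_large_desc num a b (by omega) ((hmemL a).mp ha.1).1 hab ((hmemL b).mp hb.1).2
        ha.2.1 hb.2.1
    have hpw : ((L.filter (fun i => PySem.Int.mod num i == 0 && PySem.Int.floordiv num i != i)).map
        (fun i => PySem.Int.floordiv num i)).Pairwise (· > ·) :=
      List.Pairwise.map _ (fun a b hab => hab) hpwF
    exact hpw.nodup
  · intro x hxG y hyH
    rw [List.mem_filter] at hxG
    have hxs : x ≤ Int.sqrt num := ((hmemL x).mp hxG.1).2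
    rw [List.mem_map] at hyH
    obtain ⟨i, hi, rfl⟩ := hyH
    rw [List.mem_filter, Bool.and_eq_true] at hi
    have := pv_large_gt num i (by omega) ((hmemL i).mp hi.1).1 ((hmemL i).mp hi.1).2 hi.2.1
      (by have := hi.2.2; rwa [bne_iff_ne] at this)
    omega

-- two strictly increasing lists with the same members coincide (via perm + sorted)
theorem pvA_eq_C (num : Int) (h : 1 ≤ num) : print_factor_v3 num = pvC num := by
  unfold print_factor_v3
  rw [pv_foldA num _ []]
  simp only [List.nil_append]
  apply PySem.List.sorted_eq_of_perm_of_pairwise_lt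
  · exact (List.perm_ext_iff_of_nodup (pvC_pairwise num).nodup (pvA_nodup num h)).mpr
      (fun x => (pvC_mem num h x).trans (pvA_mem num h x).symm)
  · exact pvC_pairwise num

-- ---------- B-side ----------

-- divisor decomposition along a prime power coprime to the cofactor
theorem pv_div_mul_pow (m p : Int) (hm : 1 ≤ m) (hp2 : 2 ≤ p) (hp : Prime p) (hpm : ¬ p ∣ m) :
    ∀ (e : Nat) (x : Int), 1 ≤ x → x ∣ m * p ^ e →
      ∃ (j : Nat) (d : Int), j ≤ e ∧ 1 ≤ d ∧ d ∣ m ∧ x = d * p ^ j := by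
  intro e
  induction e with
  | zero =>
    intro x hx hdvd
    exact ⟨0, x, le_refl 0, hx, by simpa using hdvd, by ring⟩
  | succ e ih =>
    intro x hx hdvd
    by_cases hpx : p ∣ x
    · obtain ⟨y, rfl⟩ := hpx
      have hy1 : 1 ≤ y := by nlinarith
      have hdvd' : y ∣ m * p ^ e := by
        have h1 : p * y ∣ p * (m * p ^ e) := by
          have : m * p ^ (e + 1) = p * (m * p ^ e) := by ring
          rwa [this] at hdvd
        exact (mul_dvd_mul_iff_left (by omega : p ≠ 0)).mp h1
      obtain ⟨j, d, hj, hd1, hdm, rfl⟩ := ih y hy1 hdvd'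
      exact ⟨j + 1, d, by omega, hd1, hdm, by ring⟩
    · have hcop : IsCoprime x (p ^ (e + 1)) := ((hp.coprime_iff_not_dvd.mpr hpx).symm).pow_right
      exact ⟨0, x, by omega, hx, hcop.dvd_of_dvd_mul_right hdvd, by ring⟩

-- the loop invariant of pvFactLoop: n divides num, the processed cofactor num/n has all its prime
-- factors < p and divs is exactly its (duplicate-free) positive divisor list, n's factors are ≥ p
def pvInv (num n p : Int) (divs : List Int) : Prop :=
  1 ≤ num ∧ 1 ≤ n ∧ 2 ≤ p ∧ n ∣ num ∧
  (∀ q : Int, 2 ≤ q → q ∣ n → p ≤ q) ∧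
  (∀ d ∈ divs, ∀ q : Int, Prime q → q ∣ d → q < p) ∧
  divs.Nodup ∧
  (∀ d : Int, d ∈ divs ↔ 1 ≤ d ∧ d * n ∣ num)

-- a number ≥ 2 all of whose divisors ≥ 2 equal itself is prime
theorem pv_prime_of_divisors (p : Int) (h2 : 2 ≤ p)
    (h : ∀ q : Int, 2 ≤ q → q ∣ p → q = p) : Prime p := by
  rw [Int.prime_iff_natAbs_prime, Nat.prime_def]
  constructor
  · omega
  · intro m hm
    rcases Nat.eq_zero_or_pos m with h0 | h0
    · subst h0
      have := Nat.eq_zero_of_zero_dvd hm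
      omega
    rcases Nat.lt_or_ge m 2 with h1 | h1
    · left; omega
    · right
      have hq : (m : Int) ∣ p := by
        have := Int.natCast_dvd_natCast.mpr hm
        rwa [Int.natAbs_of_nonneg (by omega)] at this
      have := h m (by exact_mod_cast h1) hq
      omega

-- a prime divisor of a prime p ≥ 2 is at most p
theorem pv_prime_dvd_le (q p : Int) (hq : Prime q) (hp : Prime p) (hp2 : 2 ≤ p) (h : q ∣ p) : q ≤ p := by
  have h1 : q.natAbs = p.natAbs :=
    (Nat.prime_dvd_prime_iff_eq (Int.prime_iff_natAbs_prime.mp hq)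
      (Int.prime_iff_natAbs_prime.mp hp)).mp (Int.natAbs_dvd_natAbs.mpr h)
  omega

theorem pvDivOut_spec : ∀ (fuel : Nat) (n p pk : Int) (powers : List Int), 1 ≤ n → 2 ≤ p →
    n.toNat ≤ fuel + 1 →
    ∃ e : Nat, (pvDivOut fuel n p pk powers).1 * p ^ e = n ∧ 1 ≤ (pvDivOut fuel n p pk powers).1 ∧
      ¬ p ∣ (pvDivOut fuel n p pk powers).1 ∧
      (pvDivOut fuel n p pk powers).2.2 = powers ++ (List.range e).map (fun j => pk * p ^ (j + 1)) := by
  intro fuel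
  induction fuel with
  | zero =>
    intro n p pk powers h1 h2 hf
    have hn1 : n = 1 := by omega
    subst hn1
    simp only [pvDivOut]
    refine ⟨0, by ring, le_refl 1, ?_, by simp⟩
    intro hd
    have := Int.le_of_dvd one_pos hd
    omega
  | succ fuel ih =>
    intro n p pk powers h1 h2 hf
    simp only [pvDivOut]
    by_cases hm : (PySem.Int.mod n p == 0) = true
    · rw [if_pos hm]
      have hdvd : p ∣ n := by rwa [beq_iff_eq, PySem.Int.mod_eq_zero_iff_dvd] at hm
      have hfd : PySem.Int.floordiv n p = n / p := PySem.Int.floordiv_eq_ediv_of_pos (by omega)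
      have hpn : p ≤ n := Int.le_of_dvd (by omega) hdvd
      have hmul : p * (n / p) = n := Int.mul_ediv_cancel' hdvd
      have hfd1 : 1 ≤ PySem.Int.floordiv n p := by
        rw [hfd]; nlinarith [hmul]
      have hdec : PySem.Int.floordiv n p ≤ n - 1 := by
        rw [hfd]; nlinarith [hmul]
      obtain ⟨e, he1, he2, he3, he4⟩ :=
        ih (PySem.Int.floordiv n p) p (pk * p) (powers ++ [pk * p]) hfd1 h2 (by omega)
      refine ⟨e + 1, ?_, he2, he3, ?_⟩
      · rw [pow_succ, ← mul_assoc, he1, hfd]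
        nlinarith [hmul]
      · rw [he4, List.range_succ_eq_map, List.map_cons, List.map_map, List.append_assoc]
        congr 1
        simp only [List.cons_append, List.nil_append]
        congr 1
        · ring
        · apply List.map_congr_left
          intro j _
          simp only [Function.comp_apply, Nat.succ_eq_add_one]
          ring
    · rw [if_neg hm]
      have hnd : ¬ p ∣ n := by
        intro hd
        exact hm (by rw [beq_iff_eq, PySem.Int.mod_eq_zero_iff_dvd]; exact hd)
      exact ⟨0, by ring, h1, hnd, by simp⟩

theorem pvFactLoop_spec (num : Int) : ∀ (fuel : Nat) (n p : Int) (divs : List Int),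
    pvInv num n p divs → (n + 1 - p).toNat ≤ fuel →
    ∃ p', 2 ≤ p' ∧ pvInv num (pvFactLoop fuel n p divs).1 p' (pvFactLoop fuel n p divs).2 ∧
      (pvFactLoop fuel n p divs).1 < p' * p' := by
  intro fuel
  induction fuel with
  | zero =>
    intro n p divs hinv hf
    obtain ⟨h0, h1, h2, h3, h4, h5, h6, h7⟩ := hinv
    simp only [pvFactLoop]
    refine ⟨p, h2, ⟨h0, h1, h2, h3, h4, h5, h6, h7⟩, ?_⟩
    have : n + 1 - p ≤ 0 := by omega
    nlinarith
  | succ fuel ih =>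
    intro n p divs hinv hf
    obtain ⟨h0, h1, h2, h3, h4, h5, h6, h7⟩ := hinv
    simp only [pvFactLoop]
    by_cases hg : p * p ≤ n
    · rw [if_pos hg]
      have hpn : p ≤ n := by nlinarith
      by_cases hmod : (PySem.Int.mod n p == 0) = true
      · rw [if_pos hmod]
        have hdvdp : p ∣ n := by rwa [beq_iff_eq, PySem.Int.mod_eq_zero_iff_dvd] at hmod
        have hprime : Prime p := by
          apply pv_prime_of_divisors p h2
          intro q hq2 hqp
          have hqn : q ∣ n := hqp.trans hdvdp
          have hle : q ≤ p := Int.le_of_dvd (by omega) hqp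
          have := h4 q hq2 hqn
          omega
        obtain ⟨e, he1, he2, he3, he4⟩ :=
          pvDivOut_spec n.toNat n p 1 [1] h1 h2 (by omega)
        obtain ⟨m, hm⟩ := h3
        have hm1 : 1 ≤ m := by nlinarith
        have hmem_m : m ∈ divs := (h7 m).mpr ⟨hm1, ⟨1, by rw [hm]; ring⟩⟩
        have hpm : ¬ p ∣ m := fun hd => absurd (h5 m hmem_m p hprime hd) (lt_irrefl p)
        have hpow : (pvDivOut n.toNat n p 1 [1]).2.2 = (List.range (e + 1)).map (fun j => p ^ j) := by
          rw [he4, List.range_succ_eq_map, List.map_cons, List.map_map]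
          simp [Function.comp, Nat.succ_eq_add_one]
        have hdivs' : (pvDivOut n.toNat n p 1 [1]).2.2.flatMap (fun q => divs.map (fun d => d * q)) =
            (List.range (e + 1)).flatMap (fun j => divs.map (fun d => d * p ^ j)) := by
          rw [hpow, List.flatMap_map]
        set n' := (pvDivOut n.toNat n p 1 [1]).1 with hn'
        have hnum : num = m * p ^ e * n' := by rw [hm, ← he1]; ring
        have hn'dvd : n' ∣ n := Dvd.intro _ he1
        have hn'le : n' ≤ n := by
          have hpe : (1:Int) ≤ p ^ e := one_le_pow₀ (by omega)
          nlinarith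
        have hmem' : ∀ d' : Int,
            d' ∈ (pvDivOut n.toNat n p 1 [1]).2.2.flatMap (fun q => divs.map (fun d => d * q)) ↔
            1 ≤ d' ∧ d' * n' ∣ num := by
          intro d'
          rw [hdivs', List.mem_flatMap]
          constructor
          · rintro ⟨j, hj, hd'⟩
            rw [List.mem_map] at hd'
            obtain ⟨d, hd, rfl⟩ := hd'
            rw [List.mem_range] at hj
            obtain ⟨hd1, hddvd⟩ := (h7 d).mp hd
            have hdm : d ∣ m := by
              rw [hm, mul_comm n m] at hddvd
              exact (Int.mul_dvd_mul_iff_right (by omega : n ≠ 0)).mp hddvd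
            constructor
            · have : (0:Int) < p ^ j := pow_pos (by omega) j
              nlinarith
            · rw [hnum]
              exact Int.mul_dvd_mul (Int.mul_dvd_mul hdm (pow_dvd_pow p (by omega))) dvd_rfl
          · rintro ⟨hd1, hddvd⟩
            rw [hnum] at hddvd
            have hdd : d' ∣ m * p ^ e :=
              (Int.mul_dvd_mul_iff_right (by omega : n' ≠ 0)).mp hddvd
            obtain ⟨j, d, hj, hdd1, hdm, rfl⟩ := pv_div_mul_pow m p hm1 h2 hprime hpm e d' hd1 hdd
            refine ⟨j, List.mem_range.mpr (by omega), List.mem_map.mpr ⟨d, ?_, rfl⟩⟩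
            refine (h7 d).mpr ⟨hdd1, ?_⟩
            rw [hm, mul_comm n m]
            exact Int.mul_dvd_mul hdm dvd_rfl
        have hnodup' :
            ((pvDivOut n.toNat n p 1 [1]).2.2.flatMap (fun q => divs.map (fun d => d * q))).Nodup := by
          rw [hdivs', List.nodup_flatMap]
          constructor
          · intro j _
            exact h6.map (fun a b hab => by
              have hpj : (0:Int) < p ^ j := pow_pos (by omega) j
              exact mul_right_cancel₀ (by omega) hab)
          · refine List.Pairwise.imp ?_ (List.pairwise_lt_range)
            intro a b hab x hxa hxb
            rw [List.mem_map] at hxa hxb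
            obtain ⟨d1, hd1, he⟩ := hxa
            obtain ⟨d2, hd2, rfl⟩ := hxb
            have h' : d1 * p ^ a = (d2 * p ^ (b - a)) * p ^ a := by
              rw [he, mul_assoc, ← pow_add]
              congr 2
              omega
            have hd12 : d1 = d2 * p ^ (b - a) :=
              mul_right_cancel₀ (pow_ne_zero a (by omega : p ≠ 0)) h'
            have hpd1 : p ∣ d1 := by
              rw [hd12]
              exact Dvd.dvd.mul_left ⟨p ^ (b - a - 1), by rw [← pow_succ']; congr 1; omega⟩ d2
            exact absurd (h5 d1 hd1 p hprime hpd1) (lt_irrefl p)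
        apply ih
        · refine ⟨h0, he2, by omega, hn'dvd.trans ⟨m, hm⟩, ?_, ?_, hnodup', hmem'⟩
          · intro q hq2 hqn'
            have := h4 q hq2 (hqn'.trans hn'dvd)
            rcases eq_or_lt_of_le this with heq | hlt
            · exact absurd (heq ▸ hqn') he3
            · omega
          · intro d' hd' q hq hqd'
            rw [hdivs', List.mem_flatMap] at hd'
            obtain ⟨j, _, hd'm⟩ := hd'
            rw [List.mem_map] at hd'm
            obtain ⟨d, hd, rfl⟩ := hd'm
            rcases (hq.dvd_mul.mp hqd') with hqd | hqp
            · have := h5 d hd q hq hqd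
              omega
            · have := pv_prime_dvd_le q p hq hprime h2 (hq.dvd_of_dvd_pow hqp)
              omega
        · omega
      · rw [if_neg hmod]
        apply ih
        · refine ⟨h0, h1, by omega, h3, ?_,
            fun d hd q hq hqd => by have := h5 d hd q hq hqd; omega, h6, h7⟩
          intro q hq2 hqn
          have := h4 q hq2 hqn
          rcases eq_or_lt_of_le this with heq | hlt
          · exfalso
            apply hmod
            rw [beq_iff_eq, PySem.Int.mod_eq_zero_iff_dvd, heq]
            exact hqn
          · omega
        · omega
    · rw [if_neg hg]
      exact ⟨p, h2, ⟨h0, h1, h2, h3, h4, h5, h6, h7⟩, by omega⟩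

theorem pvB_eq_C (num : Int) (h : 1 ≤ num) : print_factor_v3_alt num = pvC num := by
  unfold print_factor_v3_alt
  rw [if_neg (by omega)]
  show PySem.List.sorted
      (if 1 < (pvFactLoop num.toNat num 2 [1]).1 then
        (pvFactLoop num.toNat num 2 [1]).2 ++ (pvFactLoop num.toNat num 2 [1]).2.map (fun d => d * (pvFactLoop num.toNat num 2 [1]).1)
      else (pvFactLoop num.toNat num 2 [1]).2) (fun x => x) false = pvC num
  have hinv0 : pvInv num num 2 [1] := by
    refine ⟨h, h, le_refl 2, dvd_rfl, fun q hq2 _ => hq2, ?_, List.nodup_singleton 1, ?_⟩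
    · intro d hd q hq hqd
      rw [List.mem_singleton] at hd
      subst hd
      exact absurd (isUnit_of_dvd_one hqd) hq.not_unit
    · intro d
      rw [List.mem_singleton]
      constructor
      · rintro rfl
        exact ⟨le_refl 1, by simp⟩
      · rintro ⟨hd1, hdd⟩
        have := Int.le_of_dvd (by omega) hdd
        nlinarith
  obtain ⟨p', hp'2, ⟨j0, j1, j2, j3, j4, j5, j6, j7⟩, hlt⟩ := pvFactLoop_spec num num.toNat num 2 [1] hinv0 (by omega)
  set n' := (pvFactLoop num.toNat num 2 [1]).1 with hn'
  set divs' := (pvFactLoop num.toNat num 2 [1]).2 with hdivs'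
  rcases lt_or_ge 1 n' with hgt | hle
  · -- leftover n' > 1 is prime; append its multiples
    rw [if_pos hgt]
    have hnprime : Prime n' := by
      apply pv_prime_of_divisors n' (by omega)
      intro q hq2 hqn
      obtain ⟨c, hc⟩ := hqn
      have hcdvd : c ∣ n' := Dvd.intro_left q hc.symm
      have hc1 : 1 ≤ c := by nlinarith
      rcases lt_or_ge c 2 with hc2 | hc2
      · have : c = 1 := by omega
        rw [this, mul_one] at hc
        omega
      · exfalso
        have hq' := j4 q hq2 ⟨c, hc⟩
        have hc' := j4 c hc2 hcdvd
        nlinarith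
    obtain ⟨m, hm⟩ := j3
    have hm1 : 1 ≤ m := by nlinarith
    have hmem_m : m ∈ divs' := (j7 m).mpr ⟨hm1, ⟨1, by rw [hm]; ring⟩⟩
    have hnm : ¬ n' ∣ m := by
      intro hd
      have h1 := j5 m hmem_m n' hnprime hd
      have h2 := j4 n' (by omega) dvd_rfl
      omega
    have hmem : ∀ x : Int, x ∈ divs' ++ divs'.map (fun d => d * n') ↔ 1 ≤ x ∧ x ∣ num := by
      intro x
      rw [List.mem_append, List.mem_map]
      constructor
      · rintro (hx | ⟨d, hd, rfl⟩)
        · obtain ⟨hx1, hx2⟩ := (j7 x).mp hx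
          exact ⟨hx1, dvd_trans ⟨n', rfl⟩ hx2⟩
        · obtain ⟨hd1, hd2⟩ := (j7 d).mp hd
          exact ⟨by nlinarith, hd2⟩
      · rintro ⟨hx1, hx2⟩
        have hx2' : x ∣ m * n' ^ 1 := by
          rw [pow_one, mul_comm m n', ← hm]
          exact hx2
        obtain ⟨j, d, hj, hd1, hdm, rfl⟩ :=
          pv_div_mul_pow m n' hm1 (by omega) hnprime hnm 1 x hx1 hx2'
        have hdmem : d ∈ divs' := (j7 d).mpr ⟨hd1, by rw [hm, mul_comm n' m]; exact Int.mul_dvd_mul hdm dvd_rfl⟩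
        interval_cases j
        · left; simpa using hdmem
        · right; exact ⟨d, hdmem, by rw [pow_one]⟩
    have hnodup : (divs' ++ divs'.map (fun d => d * n')).Nodup := by
      rw [List.nodup_append]
      refine ⟨j6, j6.map (fun a b hab => mul_right_cancel₀ (by omega : n' ≠ 0) hab), ?_⟩
      intro x hx y hy
      rw [List.mem_map] at hy
      obtain ⟨d, hd, rfl⟩ := hy
      intro heq
      have hdx : n' ∣ x := heq ▸ Dvd.intro_left d rfl
      have h1 := j5 x hx n' hnprime hdx
      have h2 := j4 n' (by omega) dvd_rfl
      omega
    apply PySem.List.sorted_eq_of_perm_of_pairwise_lt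
    · exact (List.perm_ext_iff_of_nodup (pvC_pairwise num).nodup hnodup).mpr
        (fun x => (pvC_mem num h x).trans (hmem x).symm)
    · exact pvC_pairwise num
  · -- leftover n' = 1: divs' is already the full divisor list
    rw [if_neg (by omega)]
    have hn1 : n' = 1 := by omega
    have hmem : ∀ x : Int, x ∈ divs' ↔ 1 ≤ x ∧ x ∣ num := by
      intro x
      rw [j7 x, hn1, mul_one]
    apply PySem.List.sorted_eq_of_perm_of_pairwise_lt
    · exact (List.perm_ext_iff_of_nodup (pvC_pairwise num).nodup j6).mpr
        (fun x => (pvC_mem num h x).trans (hmem x).symm)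
    · exact pvC_pairwise num

-- ===== VERDICT (by name: the statement is the Claim_ definition above) =====
theorem print_factor_v3_spec : Claim_equal_print_factor_v3 := by
  intro num _hdom hpre
  unfold Spec_print_factor_v3
  rcases lt_or_ge 0 num with h | h
  · rw [pvA_eq_C num h, pvB_eq_C num h]
  · have h0 : num = 0 := le_antisymm h hpre
    subst h0
    decide
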